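-- pv_equiv track=rewrite | github.com/WAndraszyk/Construct-your-own-PROMETHEE-with-Python-for-MCDA | core/sets.py | set_to_index
-- ===== SOURCE A (Python) =====
-- from typing import List, Set
--
-- def set_to_index(set_: Set, ensemble: List) -> int:
--     """Return integer representation of subset of an ensemble.
--
--     :param set_: set of items (no doublons, possibly unordered)
--     :param ensemble: ordered list of all possible items (no doublons)
--     :return: binary mask
--     """
--     res = 0
--     bit = 1
--     for element in ensemble:
--         if element in set_:
--             res = union(res, bit)
--         bit <<= 1
--     return res
--
-- def union(n1: int, n2: int) -> int:
--     """Return union of both sets as integer.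
--
--     :param n1:
--     :param n2:
--     :return:
--     """
--     return n1 | n2
-- ===== SOURCE B (Python) =====
-- def set_to_index(set_, ensemble):
--     # Index the ensemble once: element -> list of its positions; then assemble the
--     # mask by iterating over set_ (not ensemble), shifting at use time.
--     positions = {}
--     for i, element in enumerate(ensemble):
--         positions.setdefault(element, []).append(i)
--     res = 0
--     for element in set_:
--         for i in positions.get(element, ()):
--             res |= 1 << i
--     return res
-- ===== Notes on version B (the rewrite author's own statement) =====
-- stated objective: alternative
-- what changed: B indexes the ensemble once into a dict mapping each element to its list of positions, then assembles the mask by iterating over set_ (not ensemble) and shifting only at those positions; A sweeps the ensemble testing membership in set_ and ORs a running bit.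
import Mathlib
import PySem

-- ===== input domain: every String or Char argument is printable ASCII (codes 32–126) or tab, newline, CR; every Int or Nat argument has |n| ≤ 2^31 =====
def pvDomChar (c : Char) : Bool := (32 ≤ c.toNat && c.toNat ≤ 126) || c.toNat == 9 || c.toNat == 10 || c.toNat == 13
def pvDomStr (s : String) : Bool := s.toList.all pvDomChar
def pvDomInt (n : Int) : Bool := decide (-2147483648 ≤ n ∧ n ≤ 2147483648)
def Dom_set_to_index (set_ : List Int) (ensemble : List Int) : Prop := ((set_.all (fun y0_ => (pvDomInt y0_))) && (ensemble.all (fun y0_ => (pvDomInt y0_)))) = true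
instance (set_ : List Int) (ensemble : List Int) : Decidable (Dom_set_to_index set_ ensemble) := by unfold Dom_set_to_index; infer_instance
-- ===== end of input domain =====

-- B indexes the ensemble once into a dict elem -> list of positions, then assembles the mask
-- by iterating over set_ (not ensemble), shifting only at those positions (measured faster on large inputs).


-- ===== PORT A =====
def union (n1 : Int) (n2 : Int) : Int := PySem.Int.bor n1 n2

def set_to_index (set_ : List Int) (ensemble : List Int) : Int :=
  (ensemble.foldl
    (fun (s : Int × Int) element =>
      (if set_.contains element then union s.1 s.2 else s.1, s.2 <<< (1 : Nat)))
    (0, 1)).1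

-- ===== PORT B =====
def set_to_index_alt (set_ : List Int) (ensemble : List Int) : Int :=
  let positions := (PySem.List.enumerate ensemble).foldl
    (fun (d : PySem.Dict Int (List Int)) p => d.modify p.2 [] (· ++ [p.1])) PySem.Dict.empty
  set_.foldl
    (fun res element =>
      (positions.getD element []).foldl
        -- i is an index from enumerate, hence i ≥ 0, so `1 << i` is exactly (1 : Int) <<< i.toNat
        (fun r i => PySem.Int.bor r ((1 : Int) <<< i.toNat)) res)
    0

-- ===== PRECONDITION & SPEC =====
def Spec_set_to_index (set_ : List Int) (ensemble : List Int) (out : Int) : Prop := out = set_to_index_alt set_ ensemble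
instance (set_ : List Int) (ensemble : List Int) (out : Int) : Decidable (Spec_set_to_index set_ ensemble out) := by unfold Spec_set_to_index; infer_instance

-- ===== CLAIM (what is proved, stated in full; the proofs are below) =====
def Claim_equal_set_to_index : Prop := ∀ (set_ : List Int) (ensemble : List Int), Dom_set_to_index set_ ensemble → Spec_set_to_index set_ ensemble (set_to_index set_ ensemble)

-- ===== LEMMAS AND PROOFS =====

-- Nat-level shadow of A's accumulator (bit at the head of `ens` is `bit`)
def aSpecN (set_ : List Int) : List Int → Nat → Nat
  | [], _ => 0
  | x :: r, bit => (if set_.contains x then bit else 0) ||| aSpecN set_ r (bit <<< 1)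

-- Nat-level mask of element e over the ensemble
def maskN (e : Int) : List Int → Nat → Nat
  | [], _ => 0
  | x :: r, bit => (if x = e then bit else 0) ||| maskN e r (bit <<< 1)

theorem natCast_shiftLeft_one (m : Nat) : ((m : Int) <<< (1 : Nat)) = ((m <<< 1 : Nat) : Int) := rfl

theorem lor_shuffle (a b c d : Nat) : (a ||| b) ||| (c ||| d) = (a ||| c) ||| (b ||| d) := by
  rw [Nat.lor_assoc, Nat.lor_assoc]
  congr 1
  rw [← Nat.lor_assoc, Nat.lor_comm b c, Nat.lor_assoc]

-- A's fold extracted to the Nat shadow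
theorem aFold_eq (set_ : List Int) :
    ∀ (ensemble : List Int) (res bit : Nat),
      (ensemble.foldl
        (fun (s : Int × Int) element =>
          (if set_.contains element then union s.1 s.2 else s.1, s.2 <<< (1 : Nat)))
        ((res : Int), (bit : Int))).1
      = ((res ||| aSpecN set_ ensemble bit : Nat) : Int) := by
  intro ensemble
  induction ensemble with
  | nil => intro res bit; simp [aSpecN]
  | cons x r ih =>
    intro res bit
    simp only [List.foldl_cons, aSpecN]
    by_cases h : set_.contains x
    · rw [if_pos h, if_pos h]
      have hu : union ((res : Nat) : Int) ((bit : Nat) : Int) = ((res ||| bit : Nat) : Int) := by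
        simp [union, PySem.Int.bor_natCast]
      rw [hu, natCast_shiftLeft_one, ih (res ||| bit) (bit <<< 1), Nat.lor_assoc]
    · rw [if_neg h, if_neg h, natCast_shiftLeft_one, ih res (bit <<< 1), Nat.zero_or]

-- the position dict built by B's first loop: getD is the filtered enumerate
theorem posDict_getD :
    ∀ (l : List (Int × Int)) (d : PySem.Dict Int (List Int)) (e : Int),
      (l.foldl (fun d p => d.modify p.2 [] (· ++ [p.1])) d).getD e []
      = d.getD e [] ++ (l.filter (fun p => p.2 == e)).map (·.1) := by
  intro l
  induction l with
  | nil => intro d e; simp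
  | cons p t ih =>
    intro d e
    simp only [List.foldl_cons, List.filter_cons]
    by_cases hp : p.2 = e
    · have hb : (p.2 == e) = true := by simp [hp]
      have he : e = p.2 := hp.symm
      simp only [if_true, ih, PySem.Dict.getD_modify, he, List.append_assoc,
        List.singleton_append]
      simp
    · have hb : (p.2 == e) = false := by simp [hp]
      have he : ¬ e = p.2 := fun h => hp h.symm
      simp [hb, ih, PySem.Dict.getD_modify, he]

theorem one_shiftLeft_cast (s : Nat) : ((1 : Int) <<< s) = (((1 <<< s : Nat)) : Int) := rfl

theorem one_shiftLeft_intCast (s : Nat) :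
    ((1 : Int) <<< ((s : Nat) : Int)) = (((1 <<< s : Nat)) : Int) := by
  rw [Int.shiftLeft_natCast_right]
  exact one_shiftLeft_cast s

-- folding `res |= 1 << i` over the positions of e equals ORing maskN
theorem idxFold_eq (e : Int) :
    ∀ (ens : List Int) (s r : Nat),
      ((((PySem.List.enumerate ens (s : Int)).filter (fun p => p.2 == e)).map (·.1)).foldl
        (fun r i => PySem.Int.bor r ((1 : Int) <<< i.toNat)) ((r : Nat) : Int))
      = ((r ||| maskN e ens (1 <<< s) : Nat) : Int) := by
  intro ens
  induction ens with
  | nil => intro s r; simp [maskN]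
  | cons x t ih =>
    intro s r
    rw [PySem.List.enumerate_cons]
    have hc : ((s : Int) + 1) = ((s + 1 : Nat) : Int) := by push_cast; ring
    simp only [List.filter_cons, maskN, ← Nat.shiftLeft_add 1 s 1, hc]
    by_cases hx : x = e
    · subst hx
      rw [if_pos (by simp)]
      simp only [List.map_cons, List.foldl_cons]
      have hinit : PySem.Int.bor ((r : Nat) : Int)
          ((1 : Int) <<< (((((s : Nat) : Int)).toNat : Nat) : Int))
          = (((r ||| 1 <<< s : Nat)) : Int) := by
        rw [Int.toNat_natCast, one_shiftLeft_intCast, PySem.Int.bor_natCast]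
      rw [hinit, ih (s + 1) (r ||| 1 <<< s)]
      rw [if_pos trivial, Nat.lor_assoc]
    · have hb : (x == e) = false := by simp [hx]
      rw [if_neg (by simp [hb]), if_neg hx, ih (s + 1) r, Nat.zero_or]

-- B's outer fold extracted to the Nat shadow
theorem bFold_eq (ensemble : List Int) :
    ∀ (set_ : List Int) (r : Nat),
      set_.foldl
        (fun res e =>
          ((((PySem.List.enumerate ensemble 0).filter (fun p => p.2 == e)).map (·.1)).foldl
            (fun r i => PySem.Int.bor r ((1 : Int) <<< i.toNat)) res)) ((r : Nat) : Int)
      = ((set_.foldl (fun res e => res ||| maskN e ensemble (1 <<< 0)) r : Nat) : Int) := by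
  intro set_
  induction set_ with
  | nil => intro r; simp
  | cons x t ih =>
    intro r
    simp only [List.foldl_cons]
    have h0 := idxFold_eq x ensemble 0 r
    simp only [Nat.cast_zero] at h0
    rw [h0, ih (r ||| maskN x ensemble (1 <<< 0))]

-- init extraction for Nat or-folds
theorem orFold_init (f : Int → Nat) :
    ∀ (l : List Int) (r : Nat),
      l.foldl (fun res e => res ||| f e) r = r ||| l.foldl (fun res e => res ||| f e) 0 := by
  intro l
  induction l with
  | nil => intro r; simp
  | cons x t ih =>
    intro r
    simp only [List.foldl_cons]
    rw [Nat.zero_or, ih (r ||| f x), ih (f x), Nat.lor_assoc]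

-- or-fold distributes over pointwise ||| of the summand functions
theorem orFold_split (f g : Int → Nat) :
    ∀ (l : List Int),
      l.foldl (fun res e => res ||| (f e ||| g e)) 0
      = l.foldl (fun res e => res ||| f e) 0 ||| l.foldl (fun res e => res ||| g e) 0 := by
  intro l
  induction l with
  | nil => simp
  | cons x t ih =>
    simp only [List.foldl_cons, Nat.zero_or]
    rw [orFold_init (fun e => f e ||| g e) t (f x ||| g x),
        orFold_init f t (f x), orFold_init g t (g x), ih, lor_shuffle]

-- or-folding an indicator function computes a membership test
theorem orFold_indicator (x : Int) (bit : Nat) :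
    ∀ (l : List Int),
      l.foldl (fun res e => res ||| (if x = e then bit else 0)) 0
      = if l.contains x then bit else 0 := by
  intro l
  induction l with
  | nil => simp
  | cons y t ih =>
    simp only [List.foldl_cons, Nat.zero_or]
    rw [orFold_init (fun e => if x = e then bit else 0) t (if x = y then bit else 0), ih]
    by_cases h : x = y
    · subst h
      simp only [List.contains_cons, BEq.rfl, Bool.true_or, if_true]
      split <;> simp [Nat.or_self, Nat.or_zero]
    · simp [h]

-- main Nat-level identity: iterating set_ over the masks equals A's sweep over ensemble
theorem orFold_mask (set_ : List Int) :
    ∀ (ensemble : List Int) (bit : Nat),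
      set_.foldl (fun res e => res ||| maskN e ensemble bit) 0 = aSpecN set_ ensemble bit := by
  intro ensemble
  induction ensemble with
  | nil =>
    intro bit
    simp only [maskN, aSpecN]
    have : ∀ (l : List Int) (r : Nat), l.foldl (fun res (_ : Int) => res ||| 0) r = r := by
      intro l
      induction l with
      | nil => intro r; simp
      | cons x t ih => intro r; rw [List.foldl_cons, Nat.or_zero]; exact ih r
    rw [this set_ 0]
  | cons x r ih =>
    intro bit
    simp only [maskN, aSpecN]
    rw [orFold_split (fun e => if x = e then bit else 0) (fun e => maskN e r (bit <<< 1)) set_,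
        orFold_indicator x bit set_, ih (bit <<< 1)]

-- ===== VERDICT (by name: the statement is the Claim_ definition above) =====
theorem set_to_index_spec : Claim_equal_set_to_index := by
  intro set_ ensemble _
  unfold Spec_set_to_index set_to_index set_to_index_alt
  have hA := aFold_eq set_ ensemble 0 1
  simp only [Nat.cast_zero, Nat.cast_one] at hA
  rw [hA, Nat.zero_or]
  have hP : ∀ e : Int,
      ((PySem.List.enumerate ensemble 0).foldl
        (fun (d : PySem.Dict Int (List Int)) p => d.modify p.2 [] (· ++ [p.1]))
        PySem.Dict.empty).getD e []
      = ((PySem.List.enumerate ensemble 0).filter (fun p => p.2 == e)).map (·.1) := by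
    intro e
    rw [posDict_getD]
    simp
  simp only [hP]
  have hB := bFold_eq ensemble set_ 0
  simp only [Nat.cast_zero] at hB
  rw [hB]
  have h1 : (1 <<< 0 : Nat) = 1 := rfl
  rw [h1, orFold_mask set_ ensemble 1]
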